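-- pv_equiv track=rewrite | github.com/antavelos/py2go | gst/nodes.py | trim_brackets
-- ===== SOURCE A (Python) =====
-- def trim_brackets(expr: str) -> str:
--     length = len(expr)
--     brackets_to_remove = 0
--
--     for i in range(int(length / 2)):
--         if expr[i] != "(" or expr[length - 1 - i] != ")":
--             break
--
--         brackets_to_remove += 1
--
--     return expr[brackets_to_remove:length - brackets_to_remove]
-- ===== SOURCE B (Python) =====
-- def trim_brackets(expr: str) -> str:
--     while expr.startswith("(") and expr.endswith(")"):
--         expr = expr[1:-1]
--     return expr
-- ===== Notes on version B (the rewrite author's own statement) =====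
-- stated objective: idiomatic
-- what changed: Replaces the count-then-slice pass (index loop counting matched outer pairs, then one final slice) with a loop that repeatedly strips one matched outer pair from the progressively shrunk string; no counter and no final slice.
import Mathlib
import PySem

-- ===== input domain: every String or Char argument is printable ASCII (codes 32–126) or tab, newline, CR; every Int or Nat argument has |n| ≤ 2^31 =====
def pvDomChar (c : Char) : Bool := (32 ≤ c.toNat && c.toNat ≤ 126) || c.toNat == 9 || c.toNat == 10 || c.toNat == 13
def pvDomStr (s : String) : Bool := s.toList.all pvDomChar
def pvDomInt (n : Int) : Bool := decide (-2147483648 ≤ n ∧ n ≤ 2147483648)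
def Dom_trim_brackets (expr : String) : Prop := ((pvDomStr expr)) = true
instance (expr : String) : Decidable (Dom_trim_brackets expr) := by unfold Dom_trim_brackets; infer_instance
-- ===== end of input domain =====

-- B strips one matched outer '(' … ')' pair at a time from the shrinking string instead of
-- counting matched pairs first and slicing once (objective: idiomatic; not faster).

-- ===== PORT A =====
-- the for-loop with break: i is the loop index, acc the running brackets_to_remove
def trimALoop (cs : List Char) (n : Nat) (i : Nat) (acc : Nat) : Nat :=
  if i < n / 2 then
    if PySem.List.pyGet? cs (i : Int) ≠ some '(' ∨
       PySem.List.pyGet? cs ((n : Int) - 1 - (i : Int)) ≠ some ')' then acc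
    else trimALoop cs n (i + 1) (acc + 1)
  else acc
termination_by n - i
decreasing_by omega

def trim_brackets (expr : String) : String :=
  let cs := expr.toList
  let length := cs.length
  let brackets_to_remove := trimALoop cs length 0 0
  String.ofList (PySem.List.slice cs (some (brackets_to_remove : Int))
    (some ((length : Int) - (brackets_to_remove : Int))))

-- ===== PORT B =====
-- while expr.startswith("(") and expr.endswith(")"): expr = expr[1:-1]
def trimBLoop (cs : List Char) : List Char :=
  if PySem.Chars.startswith cs ['('] && PySem.Chars.endswith cs [')'] then
    trimBLoop (PySem.List.slice cs (some 1) (some (-1)))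
  else cs
termination_by cs.length
decreasing_by
  rename_i h
  rw [Bool.and_eq_true, PySem.Chars.startswith_iff] at h
  have hne : cs ≠ [] := by rintro rfl; simp at h
  have h1 : 1 ≤ cs.length := List.length_pos_iff.mpr hne
  have hl := PySem.List.length_slice cs (1 : Int) (-1)
  simp only [PySem.List.clampIdx_neg_one] at hl
  have h2 : PySem.List.clampIdx cs.length 1 = min 1 cs.length := by
    have := PySem.List.clampIdx_natCast cs.length 1
    simpa using this
  rw [h2] at hl
  omega

def trim_brackets_alt (expr : String) : String :=
  String.ofList (trimBLoop expr.toList)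

-- ===== PRECONDITION & SPEC =====
def Spec_trim_brackets (expr : String) (out : String) : Prop := out = trim_brackets_alt expr
instance (expr : String) (out : String) : Decidable (Spec_trim_brackets expr out) := by unfold Spec_trim_brackets; infer_instance

-- ===== CLAIM (what is proved, stated in full; the proofs are below) =====
def Claim_equal_trim_brackets : Prop := ∀ (expr : String), Dom_trim_brackets expr → Spec_trim_brackets expr (trim_brackets expr)

-- ===== LEMMAS AND PROOFS =====

-- cs starts with '(' and ends with ')' exactly when it is '(' :: ms ++ [')']
theorem match_iff (cs : List Char) :
    (PySem.Chars.startswith cs ['('] && PySem.Chars.endswith cs [')']) = true ↔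
    ∃ ms, cs = '(' :: ms ++ [')'] := by
  rw [Bool.and_eq_true, PySem.Chars.startswith_iff, PySem.Chars.endswith_iff]
  constructor
  · rintro ⟨⟨t, ht⟩, ⟨u, hu⟩⟩
    subst hu
    cases u with
    | nil => simp at ht
    | cons b u' =>
      simp only [List.cons_append, List.cons.injEq] at ht
      exact ⟨u', by rw [← ht.1]⟩
  · rintro ⟨ms, rfl⟩
    exact ⟨⟨ms ++ [')'], rfl⟩, ⟨'(' :: ms, by simp⟩⟩

-- A's loop counts at most the remaining iterations
theorem trimALoop_le (cs : List Char) (n i acc : Nat) :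
    trimALoop cs n i acc ≤ acc + (n / 2 - i) := by
  unfold trimALoop
  split
  · split
    · omega
    · have := trimALoop_le cs n (i + 1) (acc + 1)
      omega
  · omega
termination_by n - i
decreasing_by omega

-- shifting A's loop into the middle of a matched outer pair
theorem trimALoop_shift (ms : List Char) (i acc : Nat) :
    trimALoop ('(' :: ms ++ [')']) (ms.length + 2) (i + 1) (acc + 1) =
    trimALoop ms ms.length i acc + 1 := by
  rw [trimALoop]
  conv_rhs => rw [trimALoop]
  by_cases hi : i < ms.length / 2
  · rw [if_pos (show i + 1 < (ms.length + 2) / 2 by omega), if_pos hi]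
    have him : i < ms.length := by omega
    have hg1 : PySem.List.pyGet? ('(' :: ms ++ [')']) (((i + 1 : Nat)) : Int) =
        PySem.List.pyGet? ms (i : Int) := by
      rw [PySem.List.pyGet?_natCast, PySem.List.pyGet?_natCast]
      simp [List.getElem?_append_left, him]
    have hg2 : PySem.List.pyGet? ('(' :: ms ++ [')']) (((ms.length + 2 : Nat) : Int) - 1 - ((i + 1 : Nat) : Int)) =
        PySem.List.pyGet? ms ((ms.length : Int) - 1 - (i : Int)) := by
      have e1 : ((ms.length + 2 : Nat) : Int) - 1 - ((i + 1 : Nat) : Int) = ((ms.length - i : Nat) : Int) := by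
        push_cast [Nat.cast_sub (le_of_lt him)]; ring
      have e2 : (ms.length : Int) - 1 - (i : Int) = ((ms.length - 1 - i : Nat) : Int) := by
        omega
      rw [e1, e2, PySem.List.pyGet?_natCast, PySem.List.pyGet?_natCast]
      have h3 : ms.length - i = (ms.length - 1 - i) + 1 := by omega
      rw [h3, List.cons_append, List.getElem?_cons_succ, List.getElem?_append_left (by omega)]
    rw [hg1, hg2]
    split
    · rfl
    · exact trimALoop_shift ms (i + 1) (acc + 1)
  · rw [if_neg (show ¬ (i + 1 < (ms.length + 2) / 2) by omega), if_neg hi]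
termination_by ms.length - i
decreasing_by omega

-- if the string is not a matched outer pair, A's loop breaks at once
theorem trimALoop_zero (cs : List Char) (h : ¬ ∃ ms, cs = '(' :: ms ++ [')']) :
    trimALoop cs cs.length 0 0 = 0 := by
  rw [trimALoop]
  split
  · rename_i hlt
    rw [if_pos]
    by_contra hc
    push_neg at hc
    obtain ⟨h1, h2⟩ := hc
    simp only [Nat.cast_zero, PySem.List.pyGet?_zero] at h1
    have e2 : (cs.length : Int) - 1 - ((0 : Nat) : Int) = ((cs.length - 1 : Nat) : Int) := by
      push_cast; omega
    rw [e2, PySem.List.pyGet?_natCast] at h2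
    have hlast : cs.getLast? = some ')' := by
      rwa [List.getLast?_eq_getElem?]
    obtain ⟨u, hu⟩ := List.getLast?_eq_some_iff.mp hlast
    cases u with
    | nil =>
      rw [hu] at h1
      simp at h1
    | cons b u' =>
      apply h
      rw [hu] at h1 ⊢
      simp only [List.cons_append, List.getElem?_cons_zero, Option.some.injEq] at h1
      exact ⟨u', by rw [h1]⟩
  · rfl

-- the final slice commutes with peeling one matched outer pair
theorem slice_peel (ms : List Char) (k : Nat) (hk : k ≤ ms.length) :
    PySem.List.slice ('(' :: ms ++ [')']) (some ((k + 1 : Nat) : Int))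
      (some (((ms.length + 2 : Nat) : Int) - ((k + 1 : Nat) : Int))) =
    PySem.List.slice ms (some (k : Int)) (some ((ms.length : Int) - (k : Int))) := by
  have e1 : ((ms.length + 2 : Nat) : Int) - ((k + 1 : Nat) : Int) = ((ms.length + 1 - k : Nat) : Int) := by
    push_cast; omega
  have e2 : (ms.length : Int) - (k : Int) = ((ms.length - k : Nat) : Int) := by
    push_cast [Nat.cast_sub hk]; ring
  rw [e1, e2, PySem.List.slice_natCast, PySem.List.slice_natCast]
  have hd : ('(' :: ms ++ [')']).drop (k + 1) = ms.drop k ++ [')'] := by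
    simp [List.drop_append_of_le_length, hk]
  rw [hd, show ms.length + 1 - k - (k + 1) = ms.length - k - k from by omega]
  rw [List.take_append_of_le_length (by simp)]

-- main equivalence on the character lists
theorem trim_key (cs : List Char) :
    PySem.List.slice cs (some ((trimALoop cs cs.length 0 0 : Nat) : Int))
      (some ((cs.length : Int) - ((trimALoop cs cs.length 0 0 : Nat) : Int))) =
    trimBLoop cs := by
  rw [trimBLoop]
  by_cases h : ∃ ms, cs = '(' :: ms ++ [')']
  · rw [if_pos ((match_iff cs).mpr h)]
    obtain ⟨ms, rfl⟩ := h
    have hlen : ('(' :: ms ++ [')']).length = ms.length + 2 := by simp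
    have hstep : trimALoop ('(' :: ms ++ [')']) (('(' :: ms ++ [')']).length) 0 0 =
        trimALoop ms ms.length 0 0 + 1 := by
      rw [hlen, trimALoop, if_pos (by omega), if_neg]
      · exact trimALoop_shift ms 0 0
      · push_neg
        refine ⟨by simp [PySem.List.pyGet?_zero], ?_⟩
        have e : ((ms.length + 2 : Nat) : Int) - 1 - ((0 : Nat) : Int) = ((ms.length + 1 : Nat) : Int) := by
          push_cast; ring
        rw [e, PySem.List.pyGet?_natCast]
        rw [List.cons_append, List.getElem?_cons_succ]
        simp
    have hB : PySem.List.slice ('(' :: ms ++ [')']) (some 1) (some (-1)) = ms := by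
      simp [PySem.List.slice, PySem.List.clampIdx]
      rw [if_neg (by omega)]
      simp
    rw [hstep, hlen, hB]
    have hk : trimALoop ms ms.length 0 0 ≤ ms.length := by
      have := trimALoop_le ms ms.length 0 0
      omega
    have hp := slice_peel ms (trimALoop ms ms.length 0 0) hk
    push_cast at hp ⊢
    rw [hp]
    exact trim_key ms
  · rw [if_neg (fun hc => h ((match_iff cs).mp hc))]
    rw [trimALoop_zero cs h]
    simp [PySem.List.slice_to_natCast]
termination_by cs.length
decreasing_by
  rename_i heq
  subst heq
  simp

-- ===== VERDICT (by name: the statement is the Claim_ definition above) =====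
theorem trim_brackets_spec : Claim_equal_trim_brackets := by
  intro expr _
  unfold Spec_trim_brackets trim_brackets trim_brackets_alt
  exact congrArg String.ofList (trim_key expr.toList)
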